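-- pv_equiv track=rewrite | github.com/MrBrantCode/unitest_baseline | mut_generate/mist_train_cf/cf_64606/solution.py | entance
-- ===== SOURCE A (Python) =====
-- def entance(s):
--     stack = []
--     for c in s:
--         if c == 'c':
--             if len(stack) < 2 or stack[-1] != 'b' or stack[-2] != 'a':
--                 return False
--             stack.pop()
--             stack.pop()
--         else:
--             stack.append(c)
--     return not stack
-- ===== SOURCE B (Python) =====
-- def entance(s):
--     while 'abc' in s:
--         s = s.replace('abc', '')
--     return not s
-- ===== Notes on version B (the rewrite author's own statement) =====
-- stated objective: simpler
-- what changed: Replaces the single-pass stack machine (with early False return) by iterated whole-string reduction: repeatedly delete every occurrence of the pattern with str.replace until none remains, then test emptiness; correct because the non-overlapping rewrite is confluent.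
import Mathlib
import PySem

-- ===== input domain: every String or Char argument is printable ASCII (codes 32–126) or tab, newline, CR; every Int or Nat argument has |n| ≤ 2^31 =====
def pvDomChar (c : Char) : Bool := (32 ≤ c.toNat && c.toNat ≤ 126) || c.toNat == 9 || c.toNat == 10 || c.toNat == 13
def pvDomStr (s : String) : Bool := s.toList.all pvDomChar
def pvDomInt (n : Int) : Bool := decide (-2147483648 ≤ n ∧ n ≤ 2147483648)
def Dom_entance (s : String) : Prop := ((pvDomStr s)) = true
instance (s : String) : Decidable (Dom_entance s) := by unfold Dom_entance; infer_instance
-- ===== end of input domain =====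

-- B replaces A's one-pass stack machine by iterated whole-string deletion of "abc"
-- (while 'abc' in s: s = s.replace('abc','')); same return value, different algorithm.

-- ===== PORT A =====
-- the for-loop over the characters, with the stack as accumulator; 'return False' ends the recursion
def entanceGo (stack : List Char) : List Char → Bool
  | [] => stack.isEmpty
  | c :: rest =>
    if c = 'c' then
      if stack.length < 2 ∨ PySem.List.pyGet? stack (-1) ≠ some 'b' ∨ PySem.List.pyGet? stack (-2) ≠ some 'a' then
        false
      else
        entanceGo stack.dropLast.dropLast rest   -- the two pops
    else
      entanceGo (stack ++ [c]) rest

def entance (s : String) : Bool := entanceGo [] s.toList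

-- ===== PORT B =====
-- helper facts needed only for the termination of B's while-loop (cited in decreasing_by):
-- `repl` is a convenient recursive characterisation of `replace cs "abc" ""`
def repl : List Char → List Char
  | [] => []
  | c :: t =>
    if ['a', 'b', 'c'] <+: (c :: t) then repl ((c :: t).drop 3) else c :: repl t
termination_by cs => cs.length
decreasing_by all_goals simp only [List.length_drop, List.length_cons]; omega

theorem replace_go_eq_repl (fuel : Nat) (l acc : List Char) (h : l.length ≤ fuel) :
    PySem.Chars.replace.go ['a', 'b', 'c'] [] fuel l acc = acc.reverse ++ repl l := by
  induction fuel generalizing l acc with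
  | zero =>
    have : l = [] := List.eq_nil_of_length_eq_zero (Nat.le_zero.mp h)
    subst this
    simp [PySem.Chars.replace.go, repl]
  | succ n ih =>
    cases l with
    | nil => simp [PySem.Chars.replace.go, repl]
    | cons c t =>
      rw [PySem.Chars.replace.go]
      by_cases hp : ['a', 'b', 'c'] <+: (c :: t)
      · have hp' : List.isPrefixOf ['a', 'b', 'c'] (c :: t) = true := by
          rwa [List.isPrefixOf_iff_prefix]
        rw [if_pos hp']
        have hlen : ((c :: t).drop 3).length ≤ n := by
          simp at h ⊢; omega
        have h3 : (['a', 'b', 'c'] : List Char).length = 3 := rfl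
        rw [h3, ih _ _ hlen]
        rw [repl, if_pos hp]
        simp
      · have hp' : ¬ List.isPrefixOf ['a', 'b', 'c'] (c :: t) = true := by
          rwa [List.isPrefixOf_iff_prefix]
        rw [if_neg hp']
        have hlen : t.length ≤ n := by simp at h; omega
        rw [ih _ _ hlen]
        rw [repl, if_neg hp]
        simp

theorem replace_eq_repl (cs : List Char) :
    PySem.Chars.replace cs ['a', 'b', 'c'] [] = repl cs := by
  rw [PySem.Chars.replace]
  simp
  exact replace_go_eq_repl cs.length cs [] le_rfl

theorem repl_length_le (cs : List Char) : (repl cs).length ≤ cs.length := by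
  fun_induction repl cs with
  | case1 => simp
  | case2 c t hp ih => simp at ih ⊢; omega
  | case3 c t hp ih => simp; omega

theorem repl_length_lt (cs : List Char) (h : ['a', 'b', 'c'] <:+: cs) :
    (repl cs).length < cs.length := by
  fun_induction repl cs with
  | case1 => simp at h
  | case2 c t hp ih =>
    have := repl_length_le ((c :: t).drop 3)
    simp at this ⊢; omega
  | case3 c t hp ih =>
    rcases (List.infix_cons_iff).mp h with h' | h'
    · exact absurd h' hp
    · have := ih h'
      simp; omega

theorem replace_toList_lt (s : String) (h : PySem.Str.isIn "abc" s = true) :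
    (PySem.Str.replace s "abc" "").toList.length < s.toList.length := by
  have hinf : ("abc".toList) <:+: s.toList := by
    rw [PySem.Str.isIn] at h
    exact (PySem.Chars.isIn_iff_infix _ _).mp h
  rw [PySem.Str.toList_replace]
  show (PySem.Chars.replace s.toList "abc".toList "".toList).length < s.toList.length
  have habc : "abc".toList = ['a', 'b', 'c'] := rfl
  have hemp : "".toList = ([] : List Char) := rfl
  rw [habc, hemp, replace_eq_repl]
  exact repl_length_lt _ (habc ▸ hinf)

-- the while-loop: delete every "abc" until none remains, then `not s`
def entanceAltLoop (s : String) : Bool :=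
  if h : PySem.Str.isIn "abc" s = true then
    entanceAltLoop (PySem.Str.replace s "abc" "")
  else
    s == ""
termination_by s.toList.length
decreasing_by exact replace_toList_lt s h

def entance_alt (s : String) : Bool := entanceAltLoop s

-- ===== PRECONDITION & SPEC =====
def Spec_entance (s : String) (out : Bool) : Prop := out = entance_alt s
instance (s : String) (out : Bool) : Decidable (Spec_entance s out) := by unfold Spec_entance; infer_instance

-- ===== CLAIM (what is proved, stated in full; the proofs are below) =====
def Claim_equal_entance : Prop := ∀ (s : String), Dom_entance s → Spec_entance s (entance s)

-- ===== LEMMAS AND PROOFS =====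

-- A's result is unchanged by deleting one "abc" occurrence off the input
theorem entanceGo_repl (cs : List Char) :
    ∀ st, entanceGo st (repl cs) = entanceGo st cs := by
  fun_induction repl cs with
  | case1 => intro st; rfl
  | case2 c t hp ih =>
    intro st
    obtain ⟨r, hr⟩ := hp
    simp at hr
    obtain ⟨hc, ht⟩ := hr
    subst hc; subst ht
    -- right side: process 'a', 'b', 'c'; the 'c' pops the freshly pushed 'a','b'
    rw [entanceGo]
    simp only [if_neg (by decide : ¬ ('a' : Char) = 'c')]
    rw [entanceGo]
    simp only [if_neg (by decide : ¬ ('b' : Char) = 'c')]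
    rw [entanceGo]
    have hguard : ¬ ((st ++ ['a'] ++ ['b']).length < 2 ∨
        PySem.List.pyGet? (st ++ ['a'] ++ ['b']) (-1) ≠ some 'b' ∨
        PySem.List.pyGet? (st ++ ['a'] ++ ['b']) (-2) ≠ some 'a') := by
      push Not
      refine ⟨by simp, ?_, ?_⟩
      · simp [PySem.List.pyGet?, PySem.List.pyIdx?]
      · simp [PySem.List.pyGet?, PySem.List.pyIdx?]
    rw [if_neg hguard]
    have hpop : (st ++ ['a'] ++ ['b']).dropLast.dropLast = st := by
      simp
    rw [hpop]
    have hdrop : ('a' :: 'b' :: 'c' :: r).drop 3 = r := rfl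
    rw [hdrop] at ih
    exact ih st
  | case3 c t hp ih =>
    intro st
    rw [entanceGo, entanceGo]
    by_cases hc : c = 'c'
    · simp only [if_pos hc]
      by_cases hg : (st.length < 2 ∨ PySem.List.pyGet? st (-1) ≠ some 'b' ∨
          PySem.List.pyGet? st (-2) ≠ some 'a')
      · rw [if_pos hg, if_pos hg]
      · rw [if_neg hg, if_neg hg]
        exact ih _
    · simp only [if_neg hc]
      exact ih _

-- on an "abc"-free string A accepts exactly the empty string (stack generalised)
theorem entanceGo_no_abc (cs : List Char) :
    ∀ st, ¬ (['a', 'b', 'c'] <:+: (st ++ cs)) → entanceGo st cs = (st ++ cs).isEmpty := by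
  induction cs with
  | nil => intro st _; simp [entanceGo]
  | cons x t ih =>
    intro st hno
    rw [entanceGo]
    by_cases hc : x = 'c'
    · subst hc
      have hguard : (st.length < 2 ∨ PySem.List.pyGet? st (-1) ≠ some 'b' ∨
          PySem.List.pyGet? st (-2) ≠ some 'a') := by
        by_contra hg
        push Not at hg
        obtain ⟨h2, hb, ha⟩ := hg
        -- then st ends in 'a',''b' and st ++ 'c'::t contains "abc"
        have h2' : 2 ≤ st.length := by omega
        have hb' : st[st.length - 1]? = some 'b' := by
          simp [PySem.List.pyGet?, PySem.List.pyIdx?] at hb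
          rw [if_pos (by omega : 1 ≤ st.length)] at hb
          simpa using hb
        have ha' : st[st.length - 2]? = some 'a' := by
          simp [PySem.List.pyGet?, PySem.List.pyIdx?] at ha
          rw [if_pos (by omega : 2 ≤ st.length)] at ha
          simpa using ha
        have hsplit : st = st.take (st.length - 2) ++ ['a', 'b'] := by
          have hdr : st.drop (st.length - 2) = ['a', 'b'] := by
            apply List.ext_getElem?
            intro i
            match i with
            | 0 =>
              rw [List.getElem?_drop]
              simpa using ha'
            | 1 =>
              rw [List.getElem?_drop]
              rw [show st.length - 2 + 1 = st.length - 1 by omega]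
              simpa using hb'
            | (n + 2) =>
              rw [List.getElem?_drop]
              rw [List.getElem?_eq_none (by omega)]
              rw [List.getElem?_eq_none (by simp)]
          conv_lhs => rw [← List.take_append_drop (st.length - 2) st]
          rw [hdr]
        apply hno
        refine ⟨st.take (st.length - 2), t, ?_⟩
        rw [show st ++ 'c' :: t = (st ++ ['c']) ++ t by simp]
        rw [hsplit]
        simp
      rw [if_pos rfl, if_pos hguard]
      simp
    · rw [if_neg hc]
      have : ¬ (['a', 'b', 'c'] <:+: ((st ++ [x]) ++ t)) := by
        simpa using hno
      rw [ih _ this]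
      simp

theorem entanceGo_eq_altLoop (s : String) :
    entanceGo [] s.toList = entanceAltLoop s := by
  fun_induction entanceAltLoop s with
  | case1 s h ih =>
    rw [← ih]
    have : (PySem.Str.replace s "abc" "").toList = repl s.toList := by
      rw [PySem.Str.toList_replace]
      exact replace_eq_repl s.toList
    rw [this, entanceGo_repl]
  | case2 s h =>
    have hno : ¬ (['a', 'b', 'c'] <:+: s.toList) := by
      have := (PySem.Chars.isIn_eq_false_iff "abc".toList s.toList).mp
        (by rw [PySem.Str.isIn] at h; simpa using h)
      exact this
    rw [entanceGo_no_abc s.toList [] (by simpa using hno)]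
    rw [List.nil_append, Bool.eq_iff_iff]
    simp [List.isEmpty_iff, String.toList_eq_nil_iff]

-- ===== VERDICT (by name: the statement is the Claim_ definition above) =====
theorem entance_spec : Claim_equal_entance := by
  intro s _
  show entance s = entance_alt s
  rw [entance, entance_alt]
  exact entanceGo_eq_altLoop s
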